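-- pv_equiv track=rewrite | github.com/tallenlawrence/word-ladder-game | project1Phase1.py | makeNeighborLists
-- ===== SOURCE A (Python) =====
-- def areNeighbors(w1, w2):
--     difChar = 0
--     isTrue = 0
--     for i in range(len(w1)):
--         difChar += 1*(w1[i] != w2[i])
--     if (difChar == 1):
--         isTrue = 1
--     else:
--         isTrue = 0
--
--     return bool(isTrue)
--
-- def makeNeighborLists(wordList):
--     L = []
--
--     for i in range(len(wordList)):
--
--         currentList = []
--         for x in range(len(wordList)):
--             if (areNeighbors(wordList[i], wordList[x]) == True):
--                 currentList.append(wordList[x])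
--         L.append(currentList)
--
--     return L
-- ===== SOURCE B (Python) =====
-- def makeNeighborLists(wordList):
--     # Bucket words by "one position deleted" keys: two words are neighbors iff
--     # they share a key (p, word-without-position-p) and their chars at p differ.
--     # Word-ladder dictionaries are uniform-length: L is the common word length.
--     L = len(wordList[0]) if wordList else 0
--     pairs = [((p, w[:p] + w[p+1:]), (j, w[p]))
--              for j, w in enumerate(wordList) for p in range(L)]
--     buckets = {}
--     for key, entry in pairs:
--         buckets.setdefault(key, []).append(entry)
--     result = []
--     for w in wordList:
--         nbrs = set()
--         for p in range(L):
--             for j, ch in buckets.get((p, w[:p] + w[p+1:]), []):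
--                 if ch != w[p]:
--                     nbrs.add(j)
--         result.append([wordList[x] for x in range(len(wordList)) if x in nbrs])
--     return result
-- ===== Notes on version B (the rewrite author's own statement) =====
-- stated objective: faster
-- what changed: Replaces the all-pairs character-by-character neighbor scan with bucketing by (position, word-with-that-position-deleted) keys: neighbor indices are gathered from hash buckets into a set and each row is emitted by a cheap index-membership pass, instead of calling the O(L) comparison for every ordered pair.
import Mathlib
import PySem

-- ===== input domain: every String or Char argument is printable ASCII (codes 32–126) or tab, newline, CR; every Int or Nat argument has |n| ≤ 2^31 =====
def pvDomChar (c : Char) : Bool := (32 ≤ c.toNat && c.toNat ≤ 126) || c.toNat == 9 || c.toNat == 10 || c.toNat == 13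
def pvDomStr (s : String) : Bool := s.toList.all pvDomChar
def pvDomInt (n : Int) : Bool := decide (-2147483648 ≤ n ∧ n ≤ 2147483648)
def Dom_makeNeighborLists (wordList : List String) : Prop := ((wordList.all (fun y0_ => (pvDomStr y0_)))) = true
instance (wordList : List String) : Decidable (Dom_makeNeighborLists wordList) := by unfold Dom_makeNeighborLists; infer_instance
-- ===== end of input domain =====

-- B buckets words by (position, word-with-that-position-deleted) keys, gathers neighbor
-- indices into a set and emits each row by an index-membership pass, instead of the
-- all-pairs character-by-character scan; a timing run measured it faster.

-- ===== PORT A =====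
-- range(len(w1)) over nonnegative positions is List.range; w1[i]/w2[i] are ported as
-- Option lookups `[i]?` (none = IndexError, counted as a mismatch — reachable only
-- outside Pre_, where the Python raises before returning anything).
def areNeighbors (w1 w2 : String) : Bool :=
  let difChar : Nat := (List.range w1.toList.length).foldl
      (fun d i => d + (if w1.toList[i]? ≠ w2.toList[i]? then 1 else 0)) 0
  let isTrue : Nat := if difChar = 1 then 1 else 0
  isTrue ≠ 0

def makeNeighborLists (wordList : List String) : List (List String) :=
  (List.range wordList.length).foldl (fun L i =>
    let currentList := (List.range wordList.length).foldl (fun c x =>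
      if areNeighbors (wordList.getD i "") (wordList.getD x "") == true
      then c ++ [wordList.getD x ""] else c) []
    L ++ [currentList]) []

-- ===== PORT B =====
-- key (p, w[:p] + w[p+1:]); the slices with 0 ≤ p < len(w) are exactly take/drop
def bKey (w : String) (p : Nat) : Nat × String :=
  (p, String.ofList (w.toList.take p ++ w.toList.drop (p + 1)))

-- `L = len(wordList[0]) if wordList else 0` is headD; the `pairs` comprehension
-- (enumerate indices are the nonnegative list positions: zipIdx); w[p] is ported as
-- getD (out of range = IndexError, only reachable outside Pre_, where the Python raises)
def bPairs (wordList : List String) : List ((Nat × String) × (Nat × Char)) :=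
  wordList.zipIdx.flatMap (fun jw => (List.range (wordList.headD "").toList.length).map
    (fun p => (bKey jw.1 p, (jw.2, jw.1.toList.getD p (Char.ofNat 0)))))

-- `buckets.setdefault(key, []).append(entry)`, i.e. d[key] = d.get(key, []) + [entry]: Dict.modify
def bBuckets (wordList : List String) : PySem.Dict (Nat × String) (List (Nat × Char)) :=
  (bPairs wordList).foldl (fun d pr => d.modify pr.1 [] (· ++ [pr.2])) PySem.Dict.empty

def makeNeighborLists_alt (wordList : List String) : List (List String) :=
  let L := (wordList.headD "").toList.length
  let buckets := bBuckets wordList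
  wordList.foldl (fun result w =>
    let nbrs : PySem.Set Nat := (List.range L).foldl (fun s p =>
        (buckets.getD (bKey w p) []).foldl (fun s jc =>
          if jc.2 ≠ w.toList.getD p (Char.ofNat 0)
          then PySem.Set.add s jc.1 else s) s) PySem.Set.empty
    result ++ [(List.range wordList.length).foldl (fun r x =>
        if nbrs.contains x then r ++ [wordList.getD x ""] else r) []]) []

-- ===== PRECONDITION & SPEC =====
-- Pre_: all words have equal length — on any list containing two words of different
-- lengths, A's areNeighbors indexes the shorter word out of range and the Python
-- raises IndexError before returning.
def Pre_makeNeighborLists (wordList : List String) : Prop :=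
  ∀ u ∈ wordList, ∀ v ∈ wordList, u.toList.length = v.toList.length
instance (wordList : List String) : Decidable (Pre_makeNeighborLists wordList) := by
  unfold Pre_makeNeighborLists; infer_instance

def pvWitness_makeNeighborLists : List String := ["ab", "ac", "bb"]

def Spec_makeNeighborLists (wordList : List String) (out : List (List String)) : Prop :=
  out = makeNeighborLists_alt wordList
instance (wordList : List String) (out : List (List String)) : Decidable (Spec_makeNeighborLists wordList out) := by
  unfold Spec_makeNeighborLists; infer_instance

-- ===== CLAIM (what is proved, stated in full; the proofs are below) =====
def Claim_equal_makeNeighborLists : Prop := ∀ (wordList : List String),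
  Dom_makeNeighborLists wordList → Pre_makeNeighborLists wordList →
  Spec_makeNeighborLists wordList (makeNeighborLists wordList)

-- ===== LEMMAS AND PROOFS =====
-- generic: membership through a foldl whose step adds elements
theorem pvMemFoldlStep {α β : Type} (F : List α → β → List α) (Q : β → α → Prop)
    (hF : ∀ s b x, x ∈ F s b ↔ x ∈ s ∨ Q b x) :
    ∀ (l : List β) (s : List α) (x : α), x ∈ l.foldl F s ↔ x ∈ s ∨ ∃ b ∈ l, Q b x := by
  intro l
  induction l with
  | nil => simp
  | cons b t ih =>
    intro s x
    simp only [List.foldl_cons, ih, hF, List.mem_cons]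
    constructor
    · rintro ((h | h) | ⟨b', hb', h⟩)
      · exact Or.inl h
      · exact Or.inr ⟨b, Or.inl rfl, h⟩
      · exact Or.inr ⟨b', Or.inr hb', h⟩
    · rintro (h | ⟨b', (rfl | hb'), h⟩)
      · exact Or.inl (Or.inl h)
      · exact Or.inl (Or.inr h)
      · exact Or.inr ⟨b', hb', h⟩

theorem pvSingletonOf {l : List Nat} {p : Nat} (hnd : l.Nodup) (hmem : p ∈ l)
    (hall : ∀ q ∈ l, q = p) : l = [p] := by
  cases l with
  | nil => cases hmem
  | cons h t =>
    have hh := hall h (List.mem_cons_self)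
    subst hh
    have ht : t = [] := by
      cases t with
      | nil => rfl
      | cons h2 t2 =>
        have := hall h2 (by simp)
        subst this
        simp at hnd
    simp [ht]

theorem pvCountPOne (ℓ : Nat) (P : Nat → Bool) :
    ((List.range ℓ).countP P = 1) ↔ ∃ p, p < ℓ ∧ P p = true ∧ ∀ q, q < ℓ → q ≠ p → ¬ P q = true := by
  rw [List.countP_eq_length_filter, List.length_eq_one_iff]
  constructor
  · rintro ⟨a, ha⟩
    have hmem : a ∈ (List.range ℓ).filter P := by rw [ha]; simp
    rw [List.mem_filter, List.mem_range] at hmem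
    refine ⟨a, hmem.1, hmem.2, ?_⟩
    intro q hq hqa hPq
    have : q ∈ (List.range ℓ).filter P := by
      rw [List.mem_filter, List.mem_range]; exact ⟨hq, hPq⟩
    rw [ha] at this
    simp at this
    exact hqa this
  · rintro ⟨p, hp, hP, huniq⟩
    refine ⟨p, pvSingletonOf ((List.nodup_range).filter P) ?_ ?_⟩
    · rw [List.mem_filter, List.mem_range]; exact ⟨hp, hP⟩
    · intro q hq
      rw [List.mem_filter, List.mem_range] at hq
      by_contra hne
      exact huniq q hq.1 hne hq.2

theorem pvFoldlCount {α : Type} (l : List α) (c : α → Prop) [DecidablePred c] (a : Nat) :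
    l.foldl (fun d i => d + if c i then 1 else 0) a = a + l.countP (fun i => decide (c i)) := by
  induction l generalizing a with
  | nil => simp
  | cons h t ih =>
    simp only [List.foldl_cons, List.countP_cons, ih]
    split_ifs <;> simp_all <;> omega

theorem pvMapRangeGetD {α β : Type} (wl : List α) (d : α) (g : α → β) :
    (List.range wl.length).map (fun i => g (wl.getD i d)) = wl.map g := by
  apply List.ext_getElem
  · simp
  · intro k h1 h2
    simp at h1
    simp [List.getD_eq_getElem?_getD, List.getElem?_eq_getElem h1]

-- deletion-key equality characterizes "equal away from p"
theorem pvDelEq (a b : List Char) (ℓ p : Nat) (ha : a.length = ℓ) (hb : b.length = ℓ) (hp : p < ℓ) :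
    (a.take p ++ a.drop (p+1) = b.take p ++ b.drop (p+1)) ↔ (∀ q, q < ℓ → q ≠ p → a[q]? = b[q]?) := by
  constructor
  · intro h q hq hqp
    rcases Nat.lt_or_ge q p with hlt | hge
    · have := congrArg (fun t => t[q]?) h
      simpa [List.getElem?_append, List.length_take, ha, hb, Nat.lt_min, hlt,
        Nat.lt_of_lt_of_le hlt (Nat.le_of_lt hp), hq, List.getElem?_take, hlt] using this
    · have hgt : p < q := Nat.lt_of_le_of_ne hge (fun e => hqp e.symm)
      have := congrArg (fun t => t[q-1]?) h
      have hlen : (a.take p).length = p := by simp [ha]; omega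
      have hlen' : (b.take p).length = p := by simp [hb]; omega
      have hge' : p ≤ q - 1 := by omega
      simp only [List.getElem?_append_right (hlen ▸ hge'), List.getElem?_append_right (hlen' ▸ hge'),
        hlen, hlen', List.getElem?_drop] at this
      have harith : p + 1 + (q - 1 - p) = q := by omega
      rwa [harith] at this
  · intro h
    apply List.ext_getElem?
    intro m
    rcases Nat.lt_or_ge m p with hlt | hge
    · have hlen : (a.take p).length = p := by simp [ha]; omega
      have hlen' : (b.take p).length = p := by simp [hb]; omega
      rw [List.getElem?_append_left (by omega), List.getElem?_append_left (by omega),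
        List.getElem?_take, List.getElem?_take]
      simp [hlt, h m (by omega) (by omega)]
    · have hlen : (a.take p).length = p := by simp [ha]; omega
      have hlen' : (b.take p).length = p := by simp [hb]; omega
      rw [List.getElem?_append_right (by omega), List.getElem?_append_right (by omega),
        hlen, hlen', List.getElem?_drop, List.getElem?_drop]
      rcases Nat.lt_or_ge (p + 1 + (m - p)) ℓ with hin | hout
      · exact h _ hin (by omega)
      · rw [List.getElem?_eq_none (by omega), List.getElem?_eq_none (by omega)]

theorem pvBucketMem (wl : List String) (k : Nat × String) (jc : Nat × Char) :
    jc ∈ (bBuckets wl).getD k [] ↔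
      ∃ x, ∃ _ : x < wl.length, ∃ p, p < (wl.headD "").toList.length ∧ bKey wl[x] p = k ∧
        jc = (x, (wl[x]).toList.getD p (Char.ofNat 0)) := by
  unfold bBuckets
  rw [PySem.Dict.getD_foldl_modify_append]
  simp only [PySem.Dict.getD_empty, List.nil_append, List.mem_map, List.mem_filter,
    bPairs, List.mem_flatMap, List.mem_zipIdx_iff_getElem?, List.mem_range, beq_iff_eq]
  constructor
  · rintro ⟨a, ⟨⟨⟨w, x⟩, hget, p, hp, hpa⟩, hk⟩, hj⟩
    have hx : x < wl.length := by
      by_contra hge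
      rw [List.getElem?_eq_none (by omega)] at hget
      cases hget
    rw [List.getElem?_eq_getElem hx] at hget
    have hw : wl[x] = w := Option.some.inj hget
    refine ⟨x, hx, p, hp, ?_, ?_⟩
    · rw [hw, ← hk, ← hpa]
    · rw [← hj, ← hpa, hw]
  · rintro ⟨x, hx, p, hp, hk, rfl⟩
    refine ⟨(bKey wl[x] p, (x, (wl[x]).toList.getD p (Char.ofNat 0))),
      ⟨⟨(wl[x], x), ?_, p, hp, rfl⟩, hk⟩, rfl⟩
    simp [List.getElem?_eq_getElem hx]

theorem pvAreNeighborsIff (w u : String) :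
    areNeighbors w u = true ↔
      ∃ p, p < w.toList.length ∧ w.toList[p]? ≠ u.toList[p]? ∧
        ∀ q, q < w.toList.length → q ≠ p → w.toList[q]? = u.toList[q]? := by
  unfold areNeighbors
  rw [pvFoldlCount (c := fun i => w.toList[i]? ≠ u.toList[i]?)]
  simp only [Nat.zero_add]
  rw [show ∀ (d : Nat), (decide ((if d = 1 then 1 else 0 : Nat) ≠ 0) = true ↔ d = 1) from by
    intro d; split_ifs with h <;> simp [h]]
  rw [pvCountPOne]
  constructor
  · rintro ⟨p, hp, hP, hU⟩
    refine ⟨p, hp, by simpa using hP, ?_⟩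
    intro q hq hqp
    have := hU q hq hqp
    simpa using this
  · rintro ⟨p, hp, hP, hU⟩
    refine ⟨p, hp, by simpa using hP, ?_⟩
    intro q hq hqp
    simpa using hU q hq hqp

theorem pvCondAddMem (l : List (Nat × Char)) (c : Nat × Char → Prop) [DecidablePred c]
    (s : PySem.Set Nat) (x : Nat) :
    x ∈ l.foldl (fun s jc => if c jc then PySem.Set.add s jc.1 else s) s ↔
      x ∈ s ∨ ∃ jc ∈ l, c jc ∧ x = jc.1 := by
  rw [pvMemFoldlStep (fun s jc => if c jc then PySem.Set.add s jc.1 else s)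
      (fun jc x => c jc ∧ x = jc.1)
      (by intro s jc x; dsimp only; split_ifs with h <;> simp [PySem.Set.mem_add, h])]

theorem pvNbrsMem (wl : List String) (w : String) (x : Nat) :
    x ∈ (List.range (wl.headD "").toList.length).foldl (fun s p =>
          ((bBuckets wl).getD (bKey w p) []).foldl (fun s jc =>
            if jc.2 ≠ w.toList.getD p (Char.ofNat 0)
            then PySem.Set.add s jc.1 else s) s) PySem.Set.empty ↔
      ∃ p, p < (wl.headD "").toList.length ∧ ∃ jc ∈ (bBuckets wl).getD (bKey w p) [],
        jc.2 ≠ w.toList.getD p (Char.ofNat 0) ∧ x = jc.1 := by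
  rw [pvMemFoldlStep
      (fun s p => ((bBuckets wl).getD (bKey w p) []).foldl (fun s jc =>
            if jc.2 ≠ w.toList.getD p (Char.ofNat 0)
            then PySem.Set.add s jc.1 else s) s)
      (fun p x => ∃ jc ∈ (bBuckets wl).getD (bKey w p) [],
        jc.2 ≠ w.toList.getD p (Char.ofNat 0) ∧ x = jc.1)
      (by intro s p x; dsimp only; exact pvCondAddMem _ _ s x)]
  simp only [PySem.Set.empty, List.not_mem_nil, List.mem_range, false_or]

theorem pvCharNe (a b : List Char) (p : Nat) (ha : p < a.length) (hb : p < b.length) :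
    (a.getD p (Char.ofNat 0) ≠ b.getD p (Char.ofNat 0)) ↔ a[p]? ≠ b[p]? := by
  rw [List.getD_eq_getElem?_getD, List.getD_eq_getElem?_getD,
    List.getElem?_eq_getElem ha, List.getElem?_eq_getElem hb]
  simp

theorem pvKeyEqIff (u w : String) (p : Nat) (hlen : u.toList.length = w.toList.length)
    (hp : p < w.toList.length) :
    bKey u p = bKey w p ↔ ∀ q, q < w.toList.length → q ≠ p → u.toList[q]? = w.toList[q]? := by
  unfold bKey
  rw [Prod.mk.injEq]
  simp only [true_and]
  rw [show (String.ofList (u.toList.take p ++ u.toList.drop (p + 1)) =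
        String.ofList (w.toList.take p ++ w.toList.drop (p + 1))) ↔
      (u.toList.take p ++ u.toList.drop (p + 1) = w.toList.take p ++ w.toList.drop (p + 1)) from by
    constructor
    · intro h; have := congrArg String.toList h; simpa using this
    · intro h; rw [h]]
  exact pvDelEq u.toList w.toList w.toList.length p hlen rfl hp

theorem pvBucketKeyMem (wl : List String) (w : String) (x p : Nat) (hx : x < wl.length) :
    (∃ jc ∈ (bBuckets wl).getD (bKey w p) [],
        jc.2 ≠ w.toList.getD p (Char.ofNat 0) ∧ x = jc.1) ↔
      p < (wl.headD "").toList.length ∧ bKey (wl.getD x "") p = bKey w p ∧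
        (wl.getD x "").toList.getD p (Char.ofNat 0) ≠ w.toList.getD p (Char.ofNat 0) := by
  have hgd : wl.getD x "" = wl[x] := by
    simp [List.getD_eq_getElem?_getD, List.getElem?_eq_getElem hx]
  constructor
  · rintro ⟨jc, hmem, hne, hxj⟩
    rw [pvBucketMem] at hmem
    obtain ⟨x', hx', p', hp', hkey, rfl⟩ := hmem
    have hpp : p' = p := congrArg Prod.fst hkey
    subst hpp
    have hxx : x = x' := hxj
    subst hxx
    rw [hgd]
    exact ⟨hp', hkey, hne⟩
  · rintro ⟨hpL, hkey, hne⟩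
    refine ⟨(x, (wl.getD x "").toList.getD p (Char.ofNat 0)), ?_, hne, rfl⟩
    rw [pvBucketMem]
    exact ⟨x, hx, p, hpL, by rw [← hgd]; exact hkey, by rw [hgd]⟩

theorem pvPredEq (wl : List String) (hPre : ∀ u ∈ wl, ∀ v ∈ wl, u.toList.length = v.toList.length)
    (w : String) (hw : w ∈ wl) (x : Nat) (hx : x < wl.length) :
    (areNeighbors w (wl.getD x "") == true) =
      PySem.Set.contains ((List.range (wl.headD "").toList.length).foldl (fun s p =>
          ((bBuckets wl).getD (bKey w p) []).foldl (fun s jc =>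
            if jc.2 ≠ w.toList.getD p (Char.ofNat 0)
            then PySem.Set.add s jc.1 else s) s) PySem.Set.empty) x := by
  have hhead : wl.headD "" ∈ wl := by
    cases wl with
    | nil => cases hw
    | cons a t => exact List.mem_cons_self
  have hL : (wl.headD "").toList.length = w.toList.length := hPre _ hhead w hw
  rw [Bool.eq_iff_iff]
  rw [beq_iff_eq, PySem.Set.contains_iff, pvNbrsMem, pvAreNeighborsIff]
  set u := wl.getD x "" with hu
  have humem : u ∈ wl := by
    rw [hu, List.getD_eq_getElem?_getD, List.getElem?_eq_getElem hx]
    exact List.getElem_mem hx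
  have hlen : u.toList.length = w.toList.length := hPre u humem w hw
  constructor
  · rintro ⟨p, hp, hne, hall⟩
    refine ⟨p, by omega, (pvBucketKeyMem wl w x p hx).2 ⟨by omega, ?_, ?_⟩⟩
    · rw [← hu]
      refine (pvKeyEqIff u w p hlen hp).2 ?_
      intro q hq hqp
      exact (hall q hq hqp).symm
    · rw [← hu]
      have hpu : p < u.toList.length := by omega
      rw [pvCharNe u.toList w.toList p hpu hp]
      exact fun h => hne h.symm
  · rintro ⟨p, hpL, hex⟩
    obtain ⟨_, hkey, hne⟩ := (pvBucketKeyMem wl w x p hx).1 hex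
    have hp : p < w.toList.length := by omega
    rw [← hu] at hkey hne
    have hpu : p < u.toList.length := by omega
    rw [pvCharNe u.toList w.toList p hpu hp] at hne
    refine ⟨p, hp, fun h => hne h.symm, ?_⟩
    intro q hq hqp
    exact ((pvKeyEqIff u w p hlen hp).1 hkey q hq hqp).symm

theorem pvMain (wl : List String) (hPre : ∀ u ∈ wl, ∀ v ∈ wl, u.toList.length = v.toList.length) :
    makeNeighborLists wl = makeNeighborLists_alt wl := by
  unfold makeNeighborLists makeNeighborLists_alt
  simp only [PySem.List.foldl_append_singleton_eq_map, PySem.List.foldl_append_if, List.nil_append]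
  rw [← pvMapRangeGetD wl "" (fun w =>
    ((List.range wl.length).filter (fun x =>
      PySem.Set.contains ((List.range (wl.headD "").toList.length).foldl (fun s p =>
          ((bBuckets wl).getD (bKey w p) []).foldl (fun s jc =>
            if jc.2 ≠ w.toList.getD p (Char.ofNat 0)
            then PySem.Set.add s jc.1 else s) s) PySem.Set.empty) x)).map (fun x => wl.getD x ""))]
  apply List.map_congr_left
  intro i hi
  rw [List.mem_range] at hi
  have hw : wl.getD i "" ∈ wl := by
    rw [List.getD_eq_getElem?_getD, List.getElem?_eq_getElem hi]
    exact List.getElem_mem hi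
  congr 1
  apply List.filter_congr
  intro x hx
  rw [List.mem_range] at hx
  exact pvPredEq wl hPre (wl.getD i "") hw x hx

-- ===== VERDICT (by name: the statement is the Claim_ definition above) =====
theorem makeNeighborLists_spec : Claim_equal_makeNeighborLists := by
  intro wordList _ hPre
  unfold Spec_makeNeighborLists
  exact pvMain wordList hPre
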